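-- pv_equiv track=rewrite | github.com/UM4iR-H3x/bbp_workflow | modules/deduper.py | deduplicate_domains
-- ===== SOURCE A (Python) =====
-- from typing import List, Set, Dict, Any, Tuple
--
-- def deduplicate_domains(domains: List[str]) -> List[str]:
--     """
--     Deduplicate domain names
--
--     Args:
--         domains: List of domain names
--
--     Returns:
--         Deduplicated list of domains
--     """
--     if not domains:
--         return []
--
--     # Normalize domains (lowercase, remove www)
--     normalized_domains = set()
--
--     for domain in domains:
--         if domain:
--             norm = domain.lower().strip()
--             if norm.startswith('www.'):
--                 norm = norm[4:]
--             normalized_domains.add(norm)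
--
--     return sorted(list(normalized_domains))
-- ===== SOURCE B (Python) =====
-- def deduplicate_domains(domains):
--     normalized = []
--     for domain in domains:
--         if domain:
--             norm = domain.lower().strip()
--             if norm.startswith('www.'):
--                 norm = norm[4:]
--             normalized.append(norm)
--     normalized.sort()
--     result = []
--     for d in normalized:
--         if not result or result[-1] != d:
--             result.append(d)
--     return result
-- ===== Notes on version B (the rewrite author's own statement) =====
-- stated objective: alternative
-- what changed: Replaces the hash-set deduplication with a sort of the normalized list followed by a single adjacent-duplicate scan (no set at all).
import Mathlib
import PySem

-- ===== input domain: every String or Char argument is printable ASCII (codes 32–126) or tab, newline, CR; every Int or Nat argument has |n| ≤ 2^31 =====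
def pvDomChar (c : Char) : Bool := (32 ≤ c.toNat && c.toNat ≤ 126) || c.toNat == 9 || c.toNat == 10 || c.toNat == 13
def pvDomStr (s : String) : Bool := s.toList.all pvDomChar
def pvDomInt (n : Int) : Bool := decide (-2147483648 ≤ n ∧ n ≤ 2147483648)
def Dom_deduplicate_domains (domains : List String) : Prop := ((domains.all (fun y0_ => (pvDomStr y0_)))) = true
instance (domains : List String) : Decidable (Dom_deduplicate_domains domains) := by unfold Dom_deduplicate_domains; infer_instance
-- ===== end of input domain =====

-- B replaces A's hash-set deduplication by sort + one adjacent-duplicate scan; same return value (alternative, not faster).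

-- ===== PORT A =====
-- shared normalization helper: domain.lower().strip(), then drop a leading 'www.'
def pvNorm (d : String) : String :=
  let norm := PySem.Str.strip (PySem.Str.lower d)
  if PySem.Str.startswith norm "www." then PySem.Str.slice norm (some 4) none else norm

def deduplicate_domains (domains : List String) : List String :=
  if domains = [] then []
  else
    let normalized_domains : PySem.Set String :=
      domains.foldl (fun s d => if d ≠ "" then PySem.Set.add s (pvNorm d) else s) PySem.Set.empty
    PySem.List.sorted normalized_domains (fun x => x) false

-- ===== PORT B =====
def deduplicate_domains_alt (domains : List String) : List String :=
  let normalized : List String :=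
    domains.foldl (fun acc d => if d ≠ "" then acc ++ [pvNorm d] else acc) []
  let sortedNorm := PySem.List.sorted normalized (fun x => x) false
  sortedNorm.foldl
    (fun result d =>
      if result = [] ∨ PySem.List.pyGetD result (-1) "" ≠ d then result ++ [d] else result) []

-- ===== PRECONDITION & SPEC =====
def Spec_deduplicate_domains (domains : List String) (out : List String) : Prop := out = deduplicate_domains_alt domains
instance (domains : List String) (out : List String) : Decidable (Spec_deduplicate_domains domains out) := by unfold Spec_deduplicate_domains; infer_instance

-- ===== CLAIM (what is proved, stated in full; the proofs are below) =====
def Claim_equal_deduplicate_domains : Prop := ∀ (domains : List String), Dom_deduplicate_domains domains → Spec_deduplicate_domains domains (deduplicate_domains domains)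

-- ===== LEMMAS AND PROOFS =====

-- elements of a strictly increasing list are ≤ its last element
lemma le_getLast_of_pairwise_lt {l : List String} (hp : l.Pairwise (· < ·))
    (hne : l ≠ []) {a : String} (ha : a ∈ l) : a ≤ l.getLast hne := by
  induction l with
  | nil => exact absurd rfl hne
  | cons x t ih =>
    rcases List.pairwise_cons.mp hp with ⟨hx, ht⟩
    cases t with
    | nil => simp at ha; simp [ha, List.getLast]
    | cons y u =>
      rcases List.mem_cons.mp ha with h | h
      · subst h
        have : a < (y :: u).getLast (by simp) := hx _ (List.getLast_mem _)
        simpa [List.getLast_cons] using this.le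
      · simpa [List.getLast_cons] using ih ht (by simp) h

-- on a ≤-sorted tail, B's adjacent-duplicate step coincides with Set.add, and the
-- accumulated result stays strictly increasing with the expected membership
lemma adj_fold_eq_set_fold (R : List String) :
    ∀ acc : List String, R.Pairwise (· ≤ ·) → acc.Pairwise (· < ·) →
    (∀ a ∈ acc, ∀ b ∈ R, a ≤ b) →
    R.foldl (fun result d =>
        if result = [] ∨ PySem.List.pyGetD result (-1) "" ≠ d then result ++ [d] else result) acc
      = R.foldl PySem.Set.add acc ∧
    (R.foldl PySem.Set.add acc).Pairwise (· < ·) ∧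
    (∀ x, x ∈ R.foldl PySem.Set.add acc ↔ x ∈ acc ∨ x ∈ R) := by
  induction R with
  | nil => intro acc _ hacc _; simpa using hacc
  | cons d R ih =>
    intro acc hR hacc hle
    rcases List.pairwise_cons.mp hR with ⟨hdR, hR'⟩
    have hmem_iff : d ∈ acc ↔ (¬ (acc = [] ∨ PySem.List.pyGetD acc (-1) "" ≠ d)) := by
      push Not
      constructor
      · intro hd
        have hne : acc ≠ [] := by rintro rfl; simp at hd
        refine ⟨hne, ?_⟩
        rw [PySem.List.pyGetD_neg_one acc "" hne]
        have h1 : d ≤ acc.getLast hne := le_getLast_of_pairwise_lt hacc hne hd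
        have h2 : acc.getLast hne ≤ d := hle _ (List.getLast_mem hne) d (by simp)
        exact le_antisymm h2 h1
      · rintro ⟨hne, hlast⟩
        rw [PySem.List.pyGetD_neg_one acc "" hne] at hlast
        rw [← hlast]; exact List.getLast_mem hne
    have hstep : (if acc = [] ∨ PySem.List.pyGetD acc (-1) "" ≠ d then acc ++ [d] else acc)
        = PySem.Set.add acc d := by
      by_cases hd : d ∈ acc
      · rw [if_neg (hmem_iff.mp hd)]
        simp [PySem.Set.add, PySem.Set.contains, hd]
      · rw [if_pos (by by_contra h; exact hd (hmem_iff.mpr h))]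
        simp [PySem.Set.add, PySem.Set.contains, hd]
    have hadd_pw : (PySem.Set.add acc d).Pairwise (· < ·) := by
      by_cases hd : d ∈ acc
      · simpa [PySem.Set.add, PySem.Set.contains, hd] using hacc
      · have : ∀ a ∈ acc, a < d := fun a ha =>
          lt_of_le_of_ne (hle a ha d (by simp)) (fun h => hd (h ▸ ha))
        simp only [PySem.Set.add, PySem.Set.contains]
        rw [if_neg (by simpa using hd)]
        exact List.pairwise_append.mpr ⟨hacc, by simp, by simpa using this⟩
    have hadd_le : ∀ a ∈ PySem.Set.add acc d, ∀ b ∈ R, a ≤ b := by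
      intro a ha b hb
      have : a ∈ acc ++ [d] ∨ a ∈ acc := by
        by_cases hd : d ∈ acc <;> simp_all [PySem.Set.add, PySem.Set.contains]
      rcases this with h | h
      · rcases List.mem_append.mp h with h | h
        · exact hle a h b (by simp [hb])
        · simp at h; subst h; exact hdR b hb
      · exact hle a h b (by simp [hb])
    have hadd_mem : ∀ x, x ∈ PySem.Set.add acc d ↔ x ∈ acc ∨ x = d := by
      intro x
      by_cases hd : d ∈ acc
      · simp [PySem.Set.add, PySem.Set.contains, hd]
        rintro rfl; exact hd
      · simp [PySem.Set.add, PySem.Set.contains, hd]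
    obtain ⟨he, hp, hm⟩ := ih (PySem.Set.add acc d) hR' hadd_pw hadd_le
    refine ⟨?_, hp, ?_⟩
    · simpa [List.foldl_cons, hstep] using he
    · intro x
      rw [List.foldl_cons, hm x, hadd_mem x]
      simp [or_assoc]

-- the normalized-list fold appended to an arbitrary prefix
lemma normFold (ds : List String) : ∀ init : List String,
    ds.foldl (fun l d => if d ≠ "" then l ++ [pvNorm d] else l) init
      = init ++ ds.foldl (fun l d => if d ≠ "" then l ++ [pvNorm d] else l) [] := by
  induction ds with
  | nil => intro init; simp
  | cons e es ih =>
    intro init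
    by_cases he : e = ""
    · have hif : ∀ init : List String, (if e ≠ "" then init ++ [pvNorm e] else init) = init :=
        fun _ => by simp [he]
      simp only [List.foldl_cons, hif]
      exact ih init
    · have hif : ∀ init : List String, (if e ≠ "" then init ++ [pvNorm e] else init) = init ++ [pvNorm e] :=
        fun _ => by simp [he]
      simp only [List.foldl_cons, hif]
      rw [ih (init ++ [pvNorm e]), ih ([] ++ [pvNorm e])]
      simp

-- A's accumulation of the set equals Set.add-folding the normalized list
lemma setA_eq (domains : List String) : ∀ acc : PySem.Set String,
    domains.foldl (fun s d => if d ≠ "" then PySem.Set.add s (pvNorm d) else s) acc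
      = (domains.foldl (fun l d => if d ≠ "" then l ++ [pvNorm d] else l) []).foldl PySem.Set.add acc := by
  induction domains with
  | nil => intro acc; rfl
  | cons d ds ih =>
    intro acc
    by_cases h : d = ""
    · have hif1 : (if d ≠ "" then PySem.Set.add acc (pvNorm d) else acc) = acc := by simp [h]
      have hif2 : (if d ≠ "" then ([] : List String) ++ [pvNorm d] else []) = [] := by simp [h]
      simp only [List.foldl_cons, hif1, hif2]
      exact ih acc
    · have hif1 : (if d ≠ "" then PySem.Set.add acc (pvNorm d) else acc) = PySem.Set.add acc (pvNorm d) := by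
        simp [h]
      have hif2 : (if d ≠ "" then ([] : List String) ++ [pvNorm d] else []) = [] ++ [pvNorm d] := by
        simp [h]
      simp only [List.foldl_cons, hif1, hif2]
      rw [ih (PySem.Set.add acc (pvNorm d)), normFold ds ([] ++ [pvNorm d])]
      simp

-- ===== VERDICT (by name: the statement is the Claim_ definition above) =====
theorem deduplicate_domains_spec : Claim_equal_deduplicate_domains := by
  intro domains _
  unfold Spec_deduplicate_domains deduplicate_domains deduplicate_domains_alt
  by_cases hnil : domains = []
  · simp [hnil, PySem.List.sorted]
  · rw [if_neg hnil]
    set L := domains.foldl (fun l d => if d ≠ "" then l ++ [pvNorm d] else l) [] with hL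
    set R := PySem.List.sorted L (fun x => x) false with hR
    have hRle : R.Pairwise (· ≤ ·) := by
      simpa using PySem.List.sorted_pairwise L (fun x => x)
    obtain ⟨he, hp, hm⟩ := adj_fold_eq_set_fold R [] hRle (by simp) (by simp)
    rw [he, setA_eq domains PySem.Set.empty]
    have hempty : (PySem.Set.empty : PySem.Set String) = [] := rfl
    rw [hempty, ← PySem.Set.ofList_eq_foldl, ← PySem.Set.ofList_eq_foldl]
    apply PySem.List.sorted_eq_of_perm_of_pairwise_lt
    · rw [List.perm_ext_iff_of_nodup (PySem.Set.nodup_ofList R) (PySem.Set.nodup_ofList L)]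
      intro a
      rw [PySem.Set.mem_ofList, PySem.Set.mem_ofList, hR, PySem.List.mem_sorted]
    · have := hp
      rw [← PySem.Set.ofList_eq_foldl] at this
      exact this
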